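-- pv_equiv track=rewrite | github.com/nick-allen21/CS274_algorithms_in_mol_bio | Assignment1/jacobsthal_numbers/dp_jacobsthal.py | jacobsthal
-- ===== SOURCE A (Python) =====
-- memo = {}
--
-- def jacobsthal(n):
--     if n in memo:
--         return memo[n]
--     if n == 0:
--         return 0
--     if n == 1:
--         return 1
--     memo[n] = jacobsthal(n-1) + 2 * jacobsthal(n-2)
--     return memo[n]
-- ===== SOURCE B (Python) =====
-- def jacobsthal(n):
--     # Closed form J(n) = (2^n - (-1)^n) / 3, via built-in fast exponentiation.
--     return (pow(2, n) - (1 if n % 2 == 0 else -1)) // 3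
-- ===== Notes on version B (the rewrite author's own statement) =====
-- stated objective: faster
-- what changed: Replaced the memoized two-term recursion by the closed form J(n) = (2^n - (-1)^n)//3 computed with built-in fast exponentiation.
import Mathlib
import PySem

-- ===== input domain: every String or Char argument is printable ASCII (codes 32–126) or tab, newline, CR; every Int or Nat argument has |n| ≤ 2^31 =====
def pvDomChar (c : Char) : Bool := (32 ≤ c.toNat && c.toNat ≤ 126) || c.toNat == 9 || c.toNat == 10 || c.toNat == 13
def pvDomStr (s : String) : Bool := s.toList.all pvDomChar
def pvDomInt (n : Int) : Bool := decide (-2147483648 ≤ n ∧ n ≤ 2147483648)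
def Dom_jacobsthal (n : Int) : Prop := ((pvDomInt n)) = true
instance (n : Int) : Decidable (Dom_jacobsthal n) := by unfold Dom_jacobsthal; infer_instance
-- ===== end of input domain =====

-- B replaces A's memoized two-term recursion by the closed form J(n) = (2^n - (-1)^n) // 3
-- with fast (binary) exponentiation: asymptotically faster (O(log n) multiplications vs O(n)).


-- ===== PORT A =====
-- A's recursion J(n) = J(n-1) + 2*J(n-2) with bases 0, 1, including the memo dict it
-- threads through the recursive calls (the memo starts empty at module load; it caches
-- values and keeps the recursion linear, exactly as in the Python).
def jacARec : Nat → PySem.Dict Nat Int → Int × PySem.Dict Nat Int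
  | n, memo =>
    match memo.get? n with
    | some v => (v, memo)
    | none =>
      if _h0 : n = 0 then (0, memo)
      else if _h1 : n = 1 then (1, memo)
      else
        let r1 := jacARec (n - 1) memo
        let r2 := jacARec (n - 2) r1.2
        let v := r1.1 + 2 * r2.1
        (v, r2.2.insert n v)
  termination_by n _ => n
  decreasing_by all_goals omega

def jacobsthal (n : Int) : Int := (jacARec n.toNat PySem.Dict.empty).1

-- ===== PORT B =====
-- binary exponentiation, the algorithm behind Python's pow(2, n)
def bpow (b : Int) (k : Nat) : Int :=
  if h : k = 0 then 1
  else
    let half := bpow b (k / 2)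
    if k % 2 = 0 then half * half else half * half * b
decreasing_by exact Nat.div_lt_self (Nat.pos_of_ne_zero h) (by omega)

def jacobsthal_alt (n : Int) : Int :=
  PySem.Int.floordiv (bpow 2 n.toNat - (if PySem.Int.mod n 2 = 0 then 1 else -1)) 3

-- ===== PRECONDITION & SPEC =====
-- A recurses past both base cases on negative n and raises RecursionError; Pre_ excludes those.
def Pre_jacobsthal (n : Int) : Prop := 0 ≤ n
instance (n : Int) : Decidable (Pre_jacobsthal n) := by unfold Pre_jacobsthal; infer_instance
def pvWitness_jacobsthal : Int := (5)

def Spec_jacobsthal (n : Int) (out : Int) : Prop := out = jacobsthal_alt n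
instance (n : Int) (out : Int) : Decidable (Spec_jacobsthal n out) := by unfold Spec_jacobsthal; infer_instance

-- ===== CLAIM (what is proved, stated in full; the proofs are below) =====
def Claim_equal_jacobsthal : Prop := ∀ (n : Int), Dom_jacobsthal n → Pre_jacobsthal n → Spec_jacobsthal n (jacobsthal n)

-- ===== LEMMAS AND PROOFS =====
-- pure reference recurrence (proof-side only)
def jacP : Nat → Int
  | 0 => 0
  | 1 => 1
  | (k + 2) => jacP (k + 1) + 2 * jacP k

theorem jacP_rec (n : Nat) (h0 : n ≠ 0) (h1 : n ≠ 1) :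
    jacP n = jacP (n - 1) + 2 * jacP (n - 2) := by
  obtain ⟨k, rfl⟩ : ∃ k, n = k + 2 := ⟨n - 2, by omega⟩
  rfl

theorem jacARec_spec (n : Nat) (m : PySem.Dict Nat Int)
    (hm : ∀ k v, m.get? k = some v → v = jacP k) :
    (jacARec n m).1 = jacP n ∧
      ∀ k v, (jacARec n m).2.get? k = some v → v = jacP k := by
  induction n using Nat.strong_induction_on generalizing m with
  | _ n ih =>
    rw [jacARec]
    rcases hget : m.get? n with _ | v
    · simp only
      by_cases h0 : n = 0
      · subst h0; exact ⟨rfl, hm⟩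
      · by_cases h1 : n = 1
        · subst h1; exact ⟨by simp [jacP], hm⟩
        · simp only [h0, h1, dite_false]
          obtain ⟨e1, hm1⟩ := ih (n - 1) (by omega) m hm
          obtain ⟨e2, hm2⟩ := ih (n - 2) (by omega) _ hm1
          constructor
          · rw [e1, e2, jacP_rec n h0 h1]
          · intro k v hkv
            rw [PySem.Dict.get?_insert] at hkv
            by_cases hk : k = n
            · subst hk
              rw [if_pos rfl] at hkv
              cases hkv
              rw [e1, e2, jacP_rec k h0 h1]
            · rw [if_neg hk] at hkv
              exact hm2 _ _ hkv
    · exact ⟨hm _ _ hget, hm⟩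

theorem bpow_eq (b : Int) (k : Nat) : bpow b k = b ^ k := by
  induction k using Nat.strong_induction_on with
  | _ k ih =>
    rw [bpow]
    by_cases h : k = 0
    · simp [h]
    · have hlt : k / 2 < k := Nat.div_lt_self (Nat.pos_of_ne_zero h) (by omega)
      simp only [h, dite_false, ih _ hlt]
      by_cases h2 : k % 2 = 0
      · rw [if_pos h2, ← pow_add]
        congr 1
        omega
      · rw [if_neg h2, ← pow_add, ← pow_succ]
        congr 1
        omega

theorem jacP_closed (k : Nat) : 3 * jacP k = 2 ^ k - (-1 : Int) ^ k := by
  induction k using Nat.twoStepInduction with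
  | zero => simp [jacP]
  | one => simp [jacP]
  | more k ih1 ih2 =>
    rw [jacP, pow_succ, pow_succ, pow_succ, pow_succ]
    linear_combination 2 * ih1 + ih2

theorem jacobsthal_spec : Claim_equal_jacobsthal := by
  intro n _ hn
  unfold Spec_jacobsthal jacobsthal jacobsthal_alt
  have hA := (jacARec_spec n.toNat PySem.Dict.empty (by simp)).1
  rw [hA, bpow_eq]
  have hmod : (if PySem.Int.mod n 2 = 0 then (1 : Int) else -1) = (-1 : Int) ^ n.toNat := by
    rw [PySem.Int.mod_eq_emod_of_pos (by norm_num)]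
    rcases Int.even_or_odd n with he | ho
    · have hev : Even n.toNat := by
        rcases he with ⟨m, hm⟩
        exact ⟨m.toNat, by omega⟩
      rw [if_pos (Int.even_iff.mp he), Even.neg_one_pow hev]
    · have hodd : Odd n.toNat := by
        rcases ho with ⟨m, hm⟩
        refine ⟨m.toNat, ?_⟩
        unfold Pre_jacobsthal at hn
        omega
      rw [if_neg (by rw [Int.odd_iff.mp ho]; norm_num), Odd.neg_one_pow hodd]
  rw [hmod, ← jacP_closed]
  rw [PySem.Int.floordiv_eq_ediv_of_pos (by norm_num)]
  omega
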